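-- pv_equiv track=rewrite | github.com/mateusb12/omnichatTests | classes/order_handler.py | _splitOrder
-- ===== SOURCE A (Python) =====
-- from typing import List, Any
--
-- def _splitOrder(order: str) -> List[str]:
--     order = order.replace('vou querer ', '')  # remove the starting phrase
--     items = order.split(', ')  # split on comma
--
--     # split items on ' e ' if ' e ' exists in items
--     final_items = []
--     for item in items:
--         if ' e ' in item:
--             subItems = item.split(' e ')
--             final_items.extend(subItems)
--         else:
--             final_items.append(item)
--
--     # re-add 'vou querer ' to the start of the first item
--     final_items[0] = f'vou querer {final_items[0]}'
--     return final_items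
-- ===== SOURCE B (Python) =====
-- from typing import List, Any
--
-- def _splitOrder(order: str) -> List[str]:
--     # Single character-level scan: cut at ', ' or ' e ' in one pass instead of two split phases.
--     s = order.replace('vou querer ', '')
--     parts = []
--     buf = []
--     i = 0
--     n = len(s)
--     while i < n:
--         if s.startswith(', ', i):
--             parts.append(''.join(buf)); buf = []; i += 2
--         elif s.startswith(' e ', i):
--             parts.append(''.join(buf)); buf = []; i += 3
--         else:
--             buf.append(s[i]); i += 1
--     parts.append(''.join(buf))
--     parts[0] = 'vou querer ' + parts[0]
--     return parts
-- ===== Notes on version B (the rewrite author's own statement) =====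
-- stated objective: alternative
-- what changed: Replaces A's two-phase splitting (split on ', ', then loop re-splitting each piece on ' e ') by a single character-level scan that cuts the string at either delimiter in one pass.
import Mathlib
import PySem

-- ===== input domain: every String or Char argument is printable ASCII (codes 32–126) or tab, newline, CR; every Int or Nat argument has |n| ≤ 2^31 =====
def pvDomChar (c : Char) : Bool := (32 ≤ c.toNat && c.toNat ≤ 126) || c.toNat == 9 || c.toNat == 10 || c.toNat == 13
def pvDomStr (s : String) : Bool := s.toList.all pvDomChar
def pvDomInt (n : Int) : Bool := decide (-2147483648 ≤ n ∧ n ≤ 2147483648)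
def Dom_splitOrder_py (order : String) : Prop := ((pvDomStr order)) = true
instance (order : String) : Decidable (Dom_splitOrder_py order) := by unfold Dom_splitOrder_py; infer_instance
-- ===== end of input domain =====

-- B replaces A's two split phases (split on ', ', then re-split each piece on ' e ') by ONE
-- character-level scan that cuts at either delimiter as it goes; same return value, alternative algorithm.

-- ===== PORT A =====
-- literal transliteration of Source A: replace, split on ', ', loop re-splitting on ' e ', re-prepend prefix to item 0
def splitOrder_py (order : String) : List String :=
  let s := PySem.Chars.replace order.toList ("vou querer ".toList) []
  let items := PySem.Chars.splitOn s (", ".toList)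
  let finalItems := items.foldl (fun acc item =>
    if PySem.Chars.isIn (" e ".toList) item then acc ++ PySem.Chars.splitOn item (" e ".toList)
    else acc ++ [item]) []
  (match finalItems with
   | p0 :: ps => ("vou querer ".toList ++ p0) :: ps
   | [] => []).map String.ofList

-- ===== PORT B =====
-- Source B's scanner loop: state = (parts so far, current buffer); cut at ', ' (2 chars) or ' e ' (3 chars)
def pvScanGo (s : List Char) (parts : List (List Char)) (buf : List Char) : List (List Char) :=
  match s with
  | [] => parts ++ [buf]
  | c :: rest =>
    if [',', ' '].isPrefixOf (c :: rest) then pvScanGo (rest.drop 1) (parts ++ [buf]) []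
    else if [' ', 'e', ' '].isPrefixOf (c :: rest) then pvScanGo (rest.drop 2) (parts ++ [buf]) []
    else pvScanGo rest parts (buf ++ [c])
termination_by s.length
decreasing_by all_goals (simp; try omega)

def splitOrder_py_alt (order : String) : List String :=
  let s := PySem.Chars.replace order.toList ("vou querer ".toList) []
  (match pvScanGo s [] [] with
   | p0 :: ps => ("vou querer ".toList ++ p0) :: ps
   | [] => []).map String.ofList

-- ===== PRECONDITION & SPEC =====
def Spec_splitOrder_py (order : String) (out : List String) : Prop := out = splitOrder_py_alt order
instance (order : String) (out : List String) : Decidable (Spec_splitOrder_py order out) := by unfold Spec_splitOrder_py; infer_instance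

-- ===== CLAIM (what is proved, stated in full; the proofs are below) =====
def Claim_equal_splitOrder_py : Prop := ∀ (order : String), Dom_splitOrder_py order → Spec_splitOrder_py order (splitOrder_py order)

-- ===== LEMMAS AND PROOFS =====

-- apply f to the head piece (a pieces list is never empty; the [] case keeps the helper total)
def pvMapHead (f : List Char → List Char) : List (List Char) → List (List Char)
  | [] => [f []]
  | p :: ps => f p :: ps

-- reference form of Python's str.split(sep) for a nonempty sep, in head-cons style
def pvSplit (sep : List Char) : List Char → List (List Char)
  | [] => [[]]
  | c :: rest =>
    if sep.isPrefixOf (c :: rest) then [] :: pvSplit sep (rest.drop (sep.length - 1))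
    else pvMapHead (c :: ·) (pvSplit sep rest)
termination_by l => l.length
decreasing_by all_goals (simp; try omega)

theorem pvSplit_head_prefix (sep : List Char) (l : List Char) :
    ∃ p0 ps, pvSplit sep l = p0 :: ps ∧ p0 <+: l := by
  induction l using pvSplit.induct sep with
  | case1 => exact ⟨[], [], by rw [pvSplit], List.nil_prefix⟩
  | case2 c rest h ih =>
    rw [pvSplit, if_pos h]
    exact ⟨[], _, rfl, List.nil_prefix⟩
  | case3 c rest h ih =>
    obtain ⟨p0, ps, he, hp⟩ := ih
    rw [pvSplit, if_neg h, he]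
    exact ⟨c :: p0, ps, rfl, List.cons_prefix_cons.mpr ⟨rfl, hp⟩⟩

theorem pvGo_eq (sep : List Char) (hsep : sep ≠ []) :
    ∀ (fuel : Nat) (l cur : List Char) (acc : List (List Char)), l.length < fuel →
      PySem.Chars.splitOn.go sep fuel l cur acc
        = acc.reverse ++ pvMapHead (fun p => cur.reverse ++ p) (pvSplit sep l) := by
  intro fuel
  induction fuel with
  | zero => intro l cur acc h; omega
  | succ fuel ih =>
    intro l cur acc h
    cases l with
    | nil =>
      simp [PySem.Chars.splitOn.go, pvSplit, pvMapHead]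
    | cons c rest =>
      rw [PySem.Chars.splitOn.go]
      by_cases hp : sep.isPrefixOf (c :: rest)
      · rw [if_pos hp]
        obtain ⟨k, hk⟩ : ∃ k, sep.length = k + 1 := ⟨sep.length - 1, by cases sep <;> simp_all⟩
        have hd : (c :: rest).drop sep.length = rest.drop (sep.length - 1) := by
          rw [hk]; simp
        have hlen : ((c :: rest).drop sep.length).length < fuel := by
          simp only [List.length_drop] at *
          have : 1 ≤ sep.length := by omega
          simp at h ⊢; omega
        rw [ih _ _ _ hlen, pvSplit, if_pos hp, hd]
        obtain ⟨p0, ps, he, -⟩ := pvSplit_head_prefix sep (rest.drop (sep.length - 1))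
        rw [he]
        simp [pvMapHead]
      · rw [if_neg hp]
        have hlen : rest.length < fuel := by simp at h; omega
        rw [ih _ _ _ hlen, pvSplit, if_neg hp]
        obtain ⟨p0, ps, he, -⟩ := pvSplit_head_prefix sep rest
        rw [he]
        simp [pvMapHead]

theorem pvSplit_eq_splitOn (sep l : List Char) (h : sep ≠ []) :
    PySem.Chars.splitOn l sep = pvSplit sep l := by
  rw [PySem.Chars.splitOn, pvGo_eq sep h (l.length + 1) l [] [] (by omega)]
  obtain ⟨p0, ps, he, -⟩ := pvSplit_head_prefix sep l
  rw [he]; simp [pvMapHead]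

theorem pvSplit_of_not_isIn (sep l : List Char) (h : PySem.Chars.isIn sep l = false) :
    pvSplit sep l = [l] := by
  rw [PySem.Chars.isIn_eq_false_iff] at h
  induction l using pvSplit.induct sep with
  | case1 => rw [pvSplit]
  | case2 c rest hp ih =>
    exact absurd ((List.isPrefixOf_iff_prefix.mp hp).isInfix) h
  | case3 c rest hp ih =>
    rw [pvSplit, if_neg hp, ih (fun hi => h (List.infix_cons hi))]
    rfl

theorem pvFlat_ne_nil (l : List Char) :
    ∃ q0 qs, (pvSplit [',', ' '] l).flatMap (fun p => pvSplit [' ', 'e', ' '] p) = q0 :: qs := by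
  obtain ⟨p0, ps, he, -⟩ := pvSplit_head_prefix [',', ' '] l
  obtain ⟨q0, qs, he2, -⟩ := pvSplit_head_prefix [' ', 'e', ' '] p0
  exact ⟨q0, qs ++ ps.flatMap (fun p => pvSplit [' ', 'e', ' '] p), by rw [he]; simp [he2]⟩

-- the heart: B's single scan = A's comma split followed by e-splitting each piece
theorem pvScanGo_spec (s : List Char) (parts : List (List Char)) (buf : List Char) :
    pvScanGo s parts buf
    = parts ++ pvMapHead (fun p => buf ++ p)
        ((pvSplit [',', ' '] s).flatMap (fun p => pvSplit [' ', 'e', ' '] p)) := by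
  induction s, parts, buf using pvScanGo.induct with
  | case1 parts buf => simp [pvScanGo, pvSplit, pvMapHead]
  | case2 parts buf c rest h ih =>
    rw [pvScanGo, if_pos h, ih]
    have hsplit : pvSplit [',', ' '] (c :: rest) = [] :: pvSplit [',', ' '] (rest.drop 1) := by
      rw [pvSplit, if_pos h]; norm_num
    obtain ⟨q0, qs, hq⟩ := pvFlat_ne_nil (rest.drop 1)
    rw [hsplit]
    simp only [List.flatMap_cons]
    rw [hq]
    have hnil : pvSplit [' ', 'e', ' '] ([] : List Char) = [[]] := by rw [pvSplit]
    rw [hnil]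
    simp [pvMapHead]
  | case3 parts buf c rest h1 h2 ih =>
    obtain ⟨t, ht⟩ := List.isPrefixOf_iff_prefix.mp h2
    simp only [List.cons_append, List.nil_append] at ht
    obtain ⟨rfl, rfl⟩ := List.cons.inj ht
    simp only [List.drop_succ_cons, List.drop_zero] at ih
    rw [pvScanGo, if_neg h1, if_pos h2]
    simp only [List.drop_succ_cons, List.drop_zero]
    rw [ih]
    obtain ⟨p0, ps, hp, -⟩ := pvSplit_head_prefix [',', ' '] t
    obtain ⟨q0, qs, hq, -⟩ := pvSplit_head_prefix [' ', 'e', ' '] p0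
    have h4 : pvSplit [',', ' '] (' ' :: 'e' :: ' ' :: t) = (' ' :: 'e' :: ' ' :: p0) :: ps := by
      rw [pvSplit, if_neg (by simp [List.isPrefixOf])]
      rw [pvSplit, if_neg (by simp [List.isPrefixOf])]
      rw [pvSplit, if_neg (by simp [List.isPrefixOf])]
      rw [hp]; simp [pvMapHead]
    have h5 : pvSplit [' ', 'e', ' '] (' ' :: 'e' :: ' ' :: p0) = [] :: pvSplit [' ', 'e', ' '] p0 := by
      rw [pvSplit, if_pos (by simp [List.isPrefixOf])]; norm_num
    rw [h4]
    simp only [List.flatMap_cons]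
    rw [h5, hp]
    simp only [List.flatMap_cons]
    rw [hq]
    simp [pvMapHead]
  | case4 parts buf c rest h1 h2 ih =>
    rw [pvScanGo, if_neg h1, if_neg h2, ih]
    obtain ⟨p0, ps, hp, hpre⟩ := pvSplit_head_prefix [',', ' '] rest
    obtain ⟨q0, qs, hq, -⟩ := pvSplit_head_prefix [' ', 'e', ' '] p0
    have h4 : pvSplit [',', ' '] (c :: rest) = (c :: p0) :: ps := by
      rw [pvSplit, if_neg h1, hp]; rfl
    have h6 : ¬ [' ', 'e', ' '].isPrefixOf (c :: p0) = true := by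
      intro hcon
      obtain ⟨u, hu⟩ := List.isPrefixOf_iff_prefix.mp hcon
      simp only [List.cons_append, List.nil_append] at hu
      obtain ⟨rfl, rfl⟩ := List.cons.inj hu
      obtain ⟨v, hv⟩ := hpre
      exact h2 (List.isPrefixOf_iff_prefix.mpr ⟨u ++ v, by simp [← hv]⟩)
    have h10 : pvSplit [' ', 'e', ' '] (c :: p0) = (c :: q0) :: qs := by
      rw [pvSplit, if_neg h6, hq]; rfl
    rw [h4]
    simp only [List.flatMap_cons]
    rw [h10, hp]
    simp only [List.flatMap_cons]
    rw [hq]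
    simp [pvMapHead]

-- A's loop body: on each item the branch collapses to 'acc ++ split(item)'
theorem pvFoldl_flatten (items : List (List Char)) (acc : List (List Char)) :
    items.foldl (fun acc item =>
      if PySem.Chars.isIn (" e ".toList) item then acc ++ PySem.Chars.splitOn item (" e ".toList)
      else acc ++ [item]) acc
    = acc ++ items.flatMap (fun item => pvSplit [' ', 'e', ' '] item) := by
  have hsep : (" e ".toList) = [' ', 'e', ' '] := rfl
  induction items generalizing acc with
  | nil => simp
  | cons item rest ih =>
    rw [List.foldl_cons, List.flatMap_cons, ih]
    by_cases hin : PySem.Chars.isIn (" e ".toList) item = true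
    · rw [if_pos hin, pvSplit_eq_splitOn _ _ (by rw [hsep]; decide), hsep]
      simp
    · have hf : PySem.Chars.isIn [' ', 'e', ' '] item = false := by
        rw [← hsep]; simpa using hin
      rw [if_neg hin, pvSplit_of_not_isIn _ _ hf]
      simp

theorem pvPorts_eq (order : String) : splitOrder_py order = splitOrder_py_alt order := by
  unfold splitOrder_py splitOrder_py_alt
  simp only
  set s := PySem.Chars.replace order.toList ("vou querer ".toList) [] with hs
  have hc : (", ".toList) = [',', ' '] := rfl
  obtain ⟨q0, qs, hq⟩ := pvFlat_ne_nil s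
  have hA : (PySem.Chars.splitOn s (", ".toList)).foldl (fun acc item =>
      if PySem.Chars.isIn (" e ".toList) item then acc ++ PySem.Chars.splitOn item (" e ".toList)
      else acc ++ [item]) []
      = q0 :: qs := by
    rw [pvFoldl_flatten, hc, pvSplit_eq_splitOn _ _ (by decide), hq]
    simp
  have hB : pvScanGo s [] [] = q0 :: qs := by
    rw [pvScanGo_spec, hq]
    simp [pvMapHead]
  rw [hA, hB]

-- ===== VERDICT (by name: the statement is the Claim_ definition above) =====
theorem splitOrder_py_spec : Claim_equal_splitOrder_py := by
  intro order _
  exact pvPorts_eq order
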